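-- pv_equiv track=rewrite | github.com/dshemetov/leetcode | python/p18.py | p1703_2
-- ===== SOURCE A (Python) =====
-- def get_gaps(nums: list[int]) -> list[int]:
--     gaps = []
--     prev = -1
--     for i, x in enumerate(nums):
--         if prev == -1 and x == 1:
--             prev = i
--         elif prev != -1 and x == 1:
--             gaps.append(i - prev)
--             prev = i
--     return gaps
--
-- def p1703_2(nums: list[int], k: int) -> int:
--     """
--     Examples:
--     >>> p1703_2([1,0,0,1,0,0], 2)
--     2
--     >>> p1703_2([1,0,0,1,0,1], 2)
--     1
--     >>> p1703_2([1,0,0,0,0,0,1,1], 3)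
--     5
--     >>> p1703_2([1,1,0,1], 2)
--     0
--     >>> p1703_2([0,0,0,1,0,1,1,0,1], 3)
--     1
--     >>> p1703_2([0,0,0,1,0,1,1,0,1], 4)
--     2
--     >>> p1703_2([1,0,1,0,1,0,0,0,1], 4)
--     6
--     """
--     if len(nums) == k or k == 1:
--         return 0
--
--     def triangular_number(n: int) -> int:
--         return n * (n + 1) // 2
--
--     mid1, mid2 = k // 2 - 1, k // 2
--     if k % 2 == 0:
--         correction_factor = triangular_number(mid1) + triangular_number(mid2)
--     else:
--         correction_factor = 2 * triangular_number(mid2)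
--
--     def calc2(gaps: list, k: int, j: int) -> int:
--         """Calculate using the absolute value formula with the differences between indices."""
--         return sum(min(i + 1, k - (i + 1)) * gaps[j + i] for i in range(k - 1))
--
--     gaps = get_gaps(nums)
--
--     if len(gaps) == k - 1:
--         return calc2(gaps, k, 0) - correction_factor
--
--     m0, m1 = calc2(gaps, k, 0), calc2(gaps, k, 1)
--     delta1 = m1 - m0
--     m = min(m0, m1)
--
--     for j in range(0, len(gaps) - k):
--         if k % 2 == 1:
--             delta2 = gaps[j] - gaps[j + k // 2] - gaps[j + k // 2 + 1] + gaps[j + k]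
--         else:
--             delta2 = gaps[j] - 2 * gaps[j + k // 2] + gaps[j + k]
--         delta1 = delta1 + delta2
--         m1 = m1 + delta1
--         m = min(m, m1)
--
--     return m - correction_factor
-- ===== SOURCE B (Python) =====
-- def p1703_2(nums: list[int], k: int) -> int:
--     if len(nums) == k or k == 1:
--         return 0
--     pos = [i for i, x in enumerate(nums) if x == 1]
--     mid = k // 2
--     if k % 2 == 0:
--         corr = (mid - 1) * mid // 2 + mid * (mid + 1) // 2
--     else:
--         corr = mid * (mid + 1)
--     costs = [
--         sum(abs(p - pos[j + mid]) for p in pos[j : j + k])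
--         for j in range(len(pos) - k + 1)
--     ]
--     return min(costs) - corr
-- ===== Notes on version B (the rewrite author's own statement) =====
-- stated objective: alternative
-- what changed: B drops A's gap-array with tent weights and incremental second-difference sliding minimum, and instead collects the positions of the ones and, for each window of k positions, directly sums absolute distances to the window's median position, taking the minimum over windows.
import Mathlib
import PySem

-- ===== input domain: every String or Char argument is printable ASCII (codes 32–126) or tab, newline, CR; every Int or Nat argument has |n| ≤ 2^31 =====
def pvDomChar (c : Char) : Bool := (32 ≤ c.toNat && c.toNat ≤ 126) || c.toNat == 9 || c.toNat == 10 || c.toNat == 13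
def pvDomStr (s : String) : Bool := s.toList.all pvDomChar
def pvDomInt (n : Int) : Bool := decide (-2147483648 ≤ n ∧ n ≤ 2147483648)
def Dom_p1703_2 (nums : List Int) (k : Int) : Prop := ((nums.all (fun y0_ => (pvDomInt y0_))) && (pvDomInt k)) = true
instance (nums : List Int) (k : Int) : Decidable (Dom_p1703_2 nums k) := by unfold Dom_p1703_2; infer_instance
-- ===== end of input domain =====

-- B replaces A's gap-array/tent-weight/second-difference sliding minimum by a direct scan of
-- windows of the ones' positions, summing absolute distances to each window's median (alternative
-- decomposition, not claimed faster).

-- ===== PORT A =====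
-- get_gaps: loop over enumerate(nums) with state (gaps, prev)
def getGapsLoop : List Int → Int → Int → List Int → List Int
  | [], _, _, gaps => gaps
  | x :: rest, i, prev, gaps =>
    if prev = -1 ∧ x = 1 then getGapsLoop rest (i + 1) i gaps
    else if prev ≠ -1 ∧ x = 1 then getGapsLoop rest (i + 1) i (gaps ++ [i - prev])
    else getGapsLoop rest (i + 1) prev gaps

def get_gaps (nums : List Int) : List Int := getGapsLoop nums 0 (-1) []

-- triangular_number
def triangular (n : Int) : Int := PySem.Int.floordiv (n * (n + 1)) 2

-- calc2: sum(min(i + 1, k - (i + 1)) * gaps[j + i] for i in range(k - 1))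
-- (gaps[j+i] as pyGetD with default 0: Pre_ keeps every accessed index in range)
def calc2A (gaps : List Int) (k j : Int) : Int :=
  (PySem.List.pyRange 0 (k - 1) 1).foldl
    (fun acc i => acc + min (i + 1) (k - (i + 1)) * PySem.List.pyGetD gaps (j + i) 0) 0

def p1703_2 (nums : List Int) (k : Int) : Int :=
  if (nums.length : Int) = k ∨ k = 1 then 0
  else
    let mid1 := PySem.Int.floordiv k 2 - 1
    let mid2 := PySem.Int.floordiv k 2
    let corr := if PySem.Int.mod k 2 = 0 then triangular mid1 + triangular mid2
                else 2 * triangular mid2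
    let gaps := get_gaps nums
    if (gaps.length : Int) = k - 1 then calc2A gaps k 0 - corr
    else
      let m0 := calc2A gaps k 0
      let m1 := calc2A gaps k 1
      let s := (PySem.List.pyRange 0 ((gaps.length : Int) - k) 1).foldl
        (fun (st : Int × Int × Int) j =>
          let delta2 :=
            if PySem.Int.mod k 2 = 1 then
              PySem.List.pyGetD gaps j 0 - PySem.List.pyGetD gaps (j + PySem.Int.floordiv k 2) 0
                - PySem.List.pyGetD gaps (j + PySem.Int.floordiv k 2 + 1) 0
                + PySem.List.pyGetD gaps (j + k) 0
            else
              PySem.List.pyGetD gaps j 0 - 2 * PySem.List.pyGetD gaps (j + PySem.Int.floordiv k 2) 0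
                + PySem.List.pyGetD gaps (j + k) 0
          let d1 := st.1 + delta2
          let nm1 := st.2.1 + d1
          (d1, nm1, min st.2.2 nm1))
        (m1 - m0, m1, min m0 m1)
      s.2.2 - corr

-- ===== PORT B =====
-- pos = [i for i, x in enumerate(nums) if x == 1]
def posLoop : List Int → Int → List Int
  | [], _ => []
  | x :: rest, i => if x = 1 then i :: posLoop rest (i + 1) else posLoop rest (i + 1)

def p1703_2_alt (nums : List Int) (k : Int) : Int :=
  if (nums.length : Int) = k ∨ k = 1 then 0
  else
    let pos := posLoop nums 0
    let mid := PySem.Int.floordiv k 2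
    let corr := if PySem.Int.mod k 2 = 0 then
        PySem.Int.floordiv ((mid - 1) * mid) 2 + PySem.Int.floordiv (mid * (mid + 1)) 2
      else mid * (mid + 1)
    let costs := (PySem.List.pyRange 0 ((pos.length : Int) - k + 1) 1).map
      (fun j => (PySem.List.slice pos (some j) (some (j + k))).foldl
        (fun acc p => acc + |p - PySem.List.pyGetD pos (j + mid) 0|) 0)
    -- min(costs): ValueError on an empty list; Pre_ keeps costs nonempty, .getD 0 is unreachable there
    (PySem.List.min? costs (fun y => y)).getD 0 - corr

-- ===== PRECONDITION & SPEC =====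
-- Pre_ is exactly where the Python A returns: the two guards, k = 0 (degenerate but both return 0),
-- or 2 ≤ k with at least k ones (fewer ones make A's calc2/loop raise IndexError; k < 0 always raises).
def Pre_p1703_2 (nums : List Int) (k : Int) : Prop :=
  (nums.length : Int) = k ∨ k = 1 ∨ k = 0 ∨ (2 ≤ k ∧ k ≤ (nums.count 1 : Int))
instance (nums : List Int) (k : Int) : Decidable (Pre_p1703_2 nums k) := by
  unfold Pre_p1703_2; infer_instance

def pvWitness_p1703_2 : List Int × Int := ([1, 0, 0, 1, 0, 1], 2)

def Spec_p1703_2 (nums : List Int) (k : Int) (out : Int) : Prop := out = p1703_2_alt nums k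
instance (nums : List Int) (k : Int) (out : Int) : Decidable (Spec_p1703_2 nums k out) := by
  unfold Spec_p1703_2; infer_instance

-- ===== CLAIM (what is proved, stated in full; the proofs are below) =====
def Claim_equal_p1703_2 : Prop := ∀ (nums : List Int) (k : Int),
  Dom_p1703_2 nums k → Pre_p1703_2 nums k → Spec_p1703_2 nums k (p1703_2 nums k)

-- ===== LEMMAS AND PROOFS =====

-- adjacent differences of the positions list (proof-side characterisation of get_gaps)
def diffs : List Int → List Int
  | a :: b :: r => (b - a) :: diffs (b :: r)
  | _ => []

-- A's tent weight min(i+1, k-(i+1)) with k = kn cast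
def wN (kn i : ℕ) : Int := min ((i : Int) + 1) ((kn : Int) - ((i : Int) + 1))

-- value of A's calc2 at window j, over Nat indices
def cfun (g : List Int) (kn j : ℕ) : Int :=
  ∑ i ∈ Finset.range (kn - 1), wN kn i * g.getD (j + i) 0

-- running minimum of c 0 .. c t
def recMin (c : ℕ → Int) : ℕ → Int
  | 0 => c 0
  | t + 1 => min (recMin c t) (c (t + 1))


theorem wN_left {kn i : ℕ} (h : 2 * i + 2 ≤ kn) : wN kn i = (i : Int) + 1 := by
  apply min_eq_left; omega

theorem wN_right {kn i : ℕ} (h : kn ≤ 2 * i + 2) : wN kn i = (kn : Int) - ((i : Int) + 1) := by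
  apply min_eq_right; omega

theorem sum_map_listRange (f : ℕ → Int) (m : ℕ) :
    ((List.range m).map f).sum = ∑ i ∈ Finset.range m, f i := by
  induction m with
  | zero => simp
  | succ m ih => rw [List.range_succ, Finset.sum_range_succ, ← ih]; simp

theorem posLoop_lb (nums : List Int) (i m : Int) (hm : m ∈ posLoop nums i) : i ≤ m := by
  induction nums generalizing i with
  | nil => simp [posLoop] at hm
  | cons x rest ih =>
    simp only [posLoop] at hm
    split at hm
    · rcases List.mem_cons.mp hm with h | h
      · omega
      · have := ih (i + 1) h; omega
    · have := ih (i + 1) hm; omega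


theorem posLoop_pairwise (nums : List Int) (i : Int) : (posLoop nums i).Pairwise (· < ·) := by
  induction nums generalizing i with
  | nil => simp [posLoop]
  | cons x rest ih =>
    simp only [posLoop]
    split
    · exact List.Pairwise.cons (fun m hm => by have := posLoop_lb rest (i + 1) m hm; omega) (ih (i + 1))
    · exact ih (i + 1)


theorem posLoop_count (nums : List Int) (i : Int) : (posLoop nums i).length = nums.count 1 := by
  induction nums generalizing i with
  | nil => simp [posLoop]
  | cons x rest ih =>
    by_cases hx : x = 1
    · simp [posLoop, hx, ih (i + 1)]
    · simp [posLoop, hx, ih (i + 1)]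


theorem getGapsLoop_pos (nums : List Int) (i prev : Int) (gaps : List Int) (h : 0 ≤ prev)
    (hi : 0 ≤ i) :
    getGapsLoop nums i prev gaps = gaps ++ diffs (prev :: posLoop nums i) := by
  induction nums generalizing i prev gaps with
  | nil => simp [getGapsLoop, posLoop, diffs]
  | cons x rest ih =>
    have hne : ¬ (prev = -1) := by omega
    by_cases hx : x = 1
    · simp only [getGapsLoop, hne, hx, false_and, if_false, ne_eq, not_false_iff, true_and,
        posLoop, if_pos]
      rw [ih (i + 1) i (gaps ++ [i - prev]) hi (by omega)]
      simp [diffs, List.append_assoc]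
    · simp only [getGapsLoop, hx, and_false, if_false, posLoop]
      exact ih (i + 1) prev gaps h (by omega)


theorem getGapsLoop_start (nums : List Int) (i : Int) (gaps : List Int) (h : 0 ≤ i) :
    getGapsLoop nums i (-1) gaps = gaps ++ diffs (posLoop nums i) := by
  induction nums generalizing i gaps with
  | nil => simp [getGapsLoop, posLoop, diffs]
  | cons x rest ih =>
    by_cases hx : x = 1
    · simp only [getGapsLoop, hx, and_true, posLoop, if_pos]
      exact getGapsLoop_pos rest (i + 1) i gaps h (by omega)
    · simp only [getGapsLoop, hx, and_false, if_false, posLoop]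
      exact ih (i + 1) gaps (by omega)


theorem get_gaps_eq (nums : List Int) : get_gaps nums = diffs (posLoop nums 0) := by
  simpa using getGapsLoop_start nums 0 [] le_rfl


theorem diffs_length (l : List Int) : (diffs l).length = l.length - 1 := by
  induction l with
  | nil => simp [diffs]
  | cons a r ih =>
    cases r with
    | nil => simp [diffs]
    | cons b r' => simp only [diffs, List.length_cons] at *; omega


theorem diffs_getD (l : List Int) (t : ℕ) (h : t + 1 < l.length) :
    (diffs l).getD t 0 = l.getD (t + 1) 0 - l.getD t 0 := by
  induction l generalizing t with
  | nil => simp at h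
  | cons a r ih =>
    cases r with
    | nil => simp at h
    | cons b r' =>
      cases t with
      | zero => simp [diffs]
      | succ t' =>
        simp only [diffs, List.getD_cons_succ]
        exact ih t' (by simpa using Nat.lt_of_succ_lt_succ h)


theorem sum_by_parts (w E : ℕ → Int) (n : ℕ) :
    ∑ i ∈ Finset.range (n + 1), w i * (E (i + 1) - E i)
      = w n * E (n + 1) - w 0 * E 0 - ∑ i ∈ Finset.range n, (w (i + 1) - w i) * E (i + 1) := by
  induction n with
  | zero => simp; ring
  | succ n ih =>
    rw [Finset.sum_range_succ, ih, Finset.sum_range_succ]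
    ring


theorem tel_Ico (F : ℕ → Int) (a b : ℕ) (h : a ≤ b) :
    ∑ i ∈ Finset.Ico a b, (F (i + 1) - F i) = F b - F a := by
  rw [Finset.sum_Ico_eq_sum_range]
  have h2 := Finset.sum_range_sub (f := fun i => F (a + i)) (b - a)
  simp only [Nat.add_zero, Nat.add_sub_cancel' h] at h2 ⊢
  exact h2


theorem delta2_even (d : ℕ → Int) (u j : ℕ) :
    ∑ i ∈ Finset.range (2*u+1), wN (2*u+2) i * (d (j+i+2) - 2 * d (j+i+1) + d (j+i))
      = d j - 2 * d (j+u+1) + d (j+2*u+2) := by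
  have hE : ∀ i : ℕ, d (j+i+2) - 2 * d (j+i+1) + d (j+i)
      = ((fun t => d (j+t+1) - d (j+t)) (i+1)) - ((fun t => d (j+t+1) - d (j+t)) i) := by
    intro i; simp only
    rw [show j+(i+1)+1 = j+i+2 from by omega, show j+(i+1) = j+i+1 from rfl]
    ring
  rw [Finset.sum_congr rfl (fun i _ => by rw [hE i]),
      sum_by_parts (wN (2*u+2)) (fun t => d (j+t+1) - d (j+t)) (2*u),
      wN_right (by omega : 2*u+2 ≤ 2*(2*u)+2), wN_left (by omega : 2*0+2 ≤ 2*u+2)]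
  have part1 : ∑ i ∈ Finset.Ico 0 u, (wN (2*u+2) (i+1) - wN (2*u+2) i) * ((fun t => d (j+t+1) - d (j+t)) (i+1))
      = ∑ i ∈ Finset.Ico 0 u, ((fun t => d (j+t+1)) (i+1) - (fun t => d (j+t+1)) i) := by
    refine Finset.sum_congr rfl (fun i hi => ?_)
    have hi' : i < u := by simpa using hi
    rw [wN_left (by omega), wN_left (by omega)]
    simp only
    rw [show j+(i+1)+1 = j+i+2 from by omega, show j+(i+1) = j+i+1 from rfl]
    push_cast; ring
  have part2 : ∑ i ∈ Finset.Ico u (2*u), (wN (2*u+2) (i+1) - wN (2*u+2) i) * ((fun t => d (j+t+1) - d (j+t)) (i+1))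
      = -∑ i ∈ Finset.Ico u (2*u), ((fun t => d (j+t+1)) (i+1) - (fun t => d (j+t+1)) i) := by
    rw [← Finset.sum_neg_distrib]
    refine Finset.sum_congr rfl (fun i hi => ?_)
    have hi' : u ≤ i ∧ i < 2*u := by simpa using hi
    rw [wN_right (by omega), wN_right (by omega)]
    simp only
    rw [show j+(i+1)+1 = j+i+2 from by omega, show j+(i+1) = j+i+1 from rfl]
    push_cast; ring
  rw [Finset.range_eq_Ico, ← Finset.sum_Ico_consecutive _ (Nat.zero_le u) (by omega : u ≤ 2*u),
      part1, part2, tel_Ico (fun t => d (j+t+1)) 0 u (by omega),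
      tel_Ico (fun t => d (j+t+1)) u (2*u) (by omega)]
  rw [show j+(2*u+1)+1 = j+2*u+2 from by omega, show j+(2*u+1) = j+2*u+1 from rfl,
      show j+0+1 = j+1 from by omega, show j+0 = j from rfl]
  push_cast; ring


theorem delta2_odd (d : ℕ → Int) (u j : ℕ) :
    ∑ i ∈ Finset.range (2*u+2), wN (2*u+3) i * (d (j+i+2) - 2 * d (j+i+1) + d (j+i))
      = d j - d (j+u+1) - d (j+u+2) + d (j+2*u+3) := by
  have hE : ∀ i : ℕ, d (j+i+2) - 2 * d (j+i+1) + d (j+i)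
      = ((fun t => d (j+t+1) - d (j+t)) (i+1)) - ((fun t => d (j+t+1) - d (j+t)) i) := by
    intro i; simp only
    rw [show j+(i+1)+1 = j+i+2 from by omega, show j+(i+1) = j+i+1 from rfl]
    ring
  rw [Finset.sum_congr rfl (fun i _ => by rw [hE i]),
      sum_by_parts (wN (2*u+3)) (fun t => d (j+t+1) - d (j+t)) (2*u+1),
      wN_right (by omega : 2*u+3 ≤ 2*(2*u+1)+2), wN_left (by omega : 2*0+2 ≤ 2*u+3)]
  have part1 : ∑ i ∈ Finset.Ico 0 u, (wN (2*u+3) (i+1) - wN (2*u+3) i) * ((fun t => d (j+t+1) - d (j+t)) (i+1))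
      = ∑ i ∈ Finset.Ico 0 u, ((fun t => d (j+t+1)) (i+1) - (fun t => d (j+t+1)) i) := by
    refine Finset.sum_congr rfl (fun i hi => ?_)
    have hi' : i < u := by simpa using hi
    rw [wN_left (by omega), wN_left (by omega)]
    simp only
    rw [show j+(i+1)+1 = j+i+2 from by omega, show j+(i+1) = j+i+1 from rfl]
    push_cast; ring
  have partmid : ∑ i ∈ Finset.Ico u (u+1), (wN (2*u+3) (i+1) - wN (2*u+3) i) * ((fun t => d (j+t+1) - d (j+t)) (i+1))
      = 0 := by
    rw [Finset.sum_Ico_succ_top (le_refl u), Finset.Ico_self, Finset.sum_empty]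
    rw [wN_right (by omega : 2*u+3 ≤ 2*(u+1)+2), wN_left (by omega : 2*u+2 ≤ 2*u+3)]
    push_cast; ring
  have part2 : ∑ i ∈ Finset.Ico (u+1) (2*u+1), (wN (2*u+3) (i+1) - wN (2*u+3) i) * ((fun t => d (j+t+1) - d (j+t)) (i+1))
      = -∑ i ∈ Finset.Ico (u+1) (2*u+1), ((fun t => d (j+t+1)) (i+1) - (fun t => d (j+t+1)) i) := by
    rw [← Finset.sum_neg_distrib]
    refine Finset.sum_congr rfl (fun i hi => ?_)
    have hi' : u+1 ≤ i ∧ i < 2*u+1 := by simpa using hi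
    rw [wN_right (by omega), wN_right (by omega)]
    simp only
    rw [show j+(i+1)+1 = j+i+2 from by omega, show j+(i+1) = j+i+1 from rfl]
    push_cast; ring
  rw [Finset.range_eq_Ico,
      ← Finset.sum_Ico_consecutive _ (Nat.zero_le (u+1)) (by omega : u+1 ≤ 2*u+1),
      ← Finset.sum_Ico_consecutive _ (Nat.zero_le u) (by omega : u ≤ u+1),
      part1, partmid, part2, tel_Ico (fun t => d (j+t+1)) 0 u (by omega),
      tel_Ico (fun t => d (j+t+1)) (u+1) (2*u+1) (by omega)]
  rw [show j+(2*u+2)+1 = j+2*u+3 from by omega, show j+(2*u+2) = j+2*u+2 from rfl,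
      show j+0+1 = j+1 from by omega, show j+0 = j from rfl,
      show j+(2*u+1)+1 = j+2*u+2 from by omega, show j+(u+1)+1 = j+u+2 from by omega]
  push_cast; ring


theorem left_abel (q : ℕ → Int) (j m : ℕ) :
    ∑ t ∈ Finset.range m, (q (j + m) - q (j + t))
      = ∑ i ∈ Finset.range m, ((i : Int) + 1) * (q (j + i + 1) - q (j + i)) := by
  induction m with
  | zero => simp
  | succ m ih =>
    have key : ∀ t : ℕ, q (j + (m + 1)) - q (j + t)
        = (q (j + m) - q (j + t)) + (q (j + m + 1) - q (j + m)) := by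
      intro t; have h : j + (m + 1) = j + m + 1 := rfl; rw [h]; ring
    rw [Finset.sum_range_succ, Finset.sum_range_succ,
        Finset.sum_congr rfl (fun t _ => key t), Finset.sum_add_distrib, ih,
        Finset.sum_const, Finset.card_range]
    have h : j + (m + 1) = j + m + 1 := rfl
    rw [h]
    ring


theorem right_abel (q : ℕ → Int) (j r : ℕ) :
    ∑ t ∈ Finset.range r, (q (j + t) - q j)
      = ∑ i ∈ Finset.range r, ((r : Int) - 1 - (i : Int)) * (q (j + i + 1) - q (j + i)) := by
  induction r with
  | zero => simp
  | succ r ih =>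
    have tele : ∑ i ∈ Finset.range r, (q (j + i + 1) - q (j + i)) = q (j + r) - q j := by
      have := Finset.sum_range_sub (f := fun i => q (j + i)) r
      simp only [Nat.add_succ] at this
      exact this
    rw [Finset.sum_range_succ, ih, Finset.sum_range_succ]
    have congr1 : ∑ i ∈ Finset.range r, (((r + 1 : ℕ) : Int) - 1 - (i : Int)) * (q (j + i + 1) - q (j + i))
        = ∑ i ∈ Finset.range r, (((r : Int) - 1 - i) * (q (j + i + 1) - q (j + i)) + (q (j + i + 1) - q (j + i))) := by
      refine Finset.sum_congr rfl (fun i _ => ?_)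
      push_cast
      ring
    rw [congr1, Finset.sum_add_distrib, tele]
    have h : j + (r + 1) = j + r + 1 := rfl
    push_cast
    ring


-- window: sum of |q(j+t) - q(j+mid)| over the window equals A's weighted gap sum
theorem window_abs_eq (q : ℕ → Int) (kn j : ℕ) (hk : 2 ≤ kn)
    (hq : ∀ a b : ℕ, j ≤ a → a ≤ b → b < j + kn → q a ≤ q b) :
    ∑ t ∈ Finset.range kn, |q (j + t) - q (j + kn / 2)|
      = ∑ i ∈ Finset.range (kn - 1), wN kn i * (q (j + i + 1) - q (j + i)) := by
  set m := kn / 2 with hm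
  have hm1 : 1 ≤ m := by omega
  have hmk : m < kn := by omega
  rw [← Finset.sum_range_add_sum_Ico _ (le_of_lt hmk)]
  have hleft : ∑ t ∈ Finset.range m, |q (j + t) - q (j + m)|
      = ∑ t ∈ Finset.range m, (q (j + m) - q (j + t)) := by
    refine Finset.sum_congr rfl (fun t ht => ?_)
    have ht' : t < m := Finset.mem_range.mp ht
    have h1 : q (j + t) ≤ q (j + m) := hq _ _ (by omega) (by omega) (by omega)
    rw [abs_sub_comm, abs_of_nonneg (by omega)]
  have hright : ∑ t ∈ Finset.Ico m kn, |q (j + t) - q (j + m)|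
      = ∑ t ∈ Finset.range (kn - m), (q (j + m + t) - q (j + m)) := by
    rw [Finset.sum_Ico_eq_sum_range]
    refine Finset.sum_congr rfl (fun t ht => ?_)
    have ht' : t < kn - m := Finset.mem_range.mp ht
    have h1 : q (j + m) ≤ q (j + (m + t)) := hq _ _ (by omega) (by omega) (by omega)
    rw [show j + (m + t) = j + m + t from by omega] at h1 ⊢
    rw [abs_of_nonneg (by omega)]
  rw [hleft, hright, left_abel, right_abel]
  -- reindex the right part to Ico m kn
  have hre : ∑ i ∈ Finset.range (kn - m), ((kn - m : ℕ) - 1 - (i : Int)) * (q (j + m + i + 1) - q (j + m + i))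
      = ∑ i ∈ Finset.Ico m kn, ((kn : Int) - 1 - (i : Int)) * (q (j + i + 1) - q (j + i)) := by
    rw [Finset.sum_Ico_eq_sum_range]
    refine Finset.sum_congr rfl (fun i hi => ?_)
    have hi' : i < kn - m := by simpa using hi
    rw [show j + (m + i) + 1 = j + m + i + 1 from by omega,
        show j + (m + i) = j + m + i from by omega]
    have hcast : ((m + i : ℕ) : Int) = (m : Int) + i := by push_cast; ring
    rw [hcast]
    have : ((kn - m : ℕ) : Int) = (kn : Int) - m := by
      rw [Nat.cast_sub (le_of_lt hmk)]
    rw [this]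
    ring
  rw [hre]
  -- split the weight sum at m and peel the zero top coefficient off the Ico part
  have htop : ∑ i ∈ Finset.Ico m kn, ((kn : Int) - 1 - (i : Int)) * (q (j + i + 1) - q (j + i))
      = ∑ i ∈ Finset.Ico m (kn - 1), ((kn : Int) - 1 - (i : Int)) * (q (j + i + 1) - q (j + i)) := by
    rw [show kn = (kn - 1) + 1 from by omega, Finset.sum_Ico_succ_top (by omega : m ≤ kn - 1)]
    have hz : ((((kn:ℕ) - 1 + 1 : ℕ)) : Int) - 1 - ((kn - 1 : ℕ) : Int) = 0 := by
      push_cast [Nat.cast_sub (by omega : 1 ≤ kn)]; ring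
    rw [show ((kn:ℕ) - 1 + 1 : ℕ) = kn from by omega] at hz ⊢
    rw [hz, zero_mul, add_zero]
  rw [htop, ← Finset.sum_range_add_sum_Ico _ (by omega : m ≤ kn - 1)]
  congr 1
  · refine Finset.sum_congr rfl (fun i hi => ?_)
    have hi' : i < m := Finset.mem_range.mp hi
    rw [wN_left (by omega)]
  · refine Finset.sum_congr rfl (fun i hi => ?_)
    have hi' : m ≤ i ∧ i < kn - 1 := by simpa using hi
    rw [wN_right (by omega)]
    ring


theorem foldl_min_range (c : ℕ → Int) (W : ℕ) :
    ((List.range W).map (fun t => c (t + 1))).foldl min (c 0) = recMin c W := by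
  induction W with
  | zero => rfl
  | succ W ih =>
    rw [List.range_succ, List.map_append, List.foldl_append, ih]
    rfl

theorem min?_map_range (c : ℕ → Int) (W : ℕ) :
    PySem.List.min? ((List.range (W + 1)).map c) (fun y => y) = some (recMin c W) := by
  rw [List.range_succ_eq_map, List.map_cons, List.map_map, PySem.List.min?_id_cons]
  rw [show (c ∘ Nat.succ) = (fun t => c (t + 1)) from rfl, foldl_min_range]


theorem foldl_min_replicate (a : Int) (mr : ℕ) :
    (List.replicate mr a).foldl min a = a := by
  induction mr with
  | zero => rfl
  | succ m ih => simpa [List.replicate_succ] using ih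

theorem recMin_congr (c c' : ℕ → Int) (W : ℕ) (h : ∀ t ≤ W, c t = c' t) :
    recMin c W = recMin c' W := by
  induction W with
  | zero => exact h 0 le_rfl
  | succ W ih =>
    simp only [recMin]
    rw [ih (fun t ht => h t (by omega)), h (W + 1) le_rfl]

theorem P_mono (P : List Int) (hP : P.Pairwise (· < ·)) (a b : ℕ)
    (hab : a ≤ b) (hb : b < P.length) : P.getD a 0 ≤ P.getD b 0 := by
  rcases Nat.lt_or_ge a b with h | h
  · rw [List.getD_eq_getElem _ _ (by omega), List.getD_eq_getElem _ _ hb]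
    exact le_of_lt (List.pairwise_iff_getElem.mp hP a b (by omega) hb h)
  · have : a = b := by omega
    rw [this]

theorem calc2A_eq (g : List Int) (kn j : ℕ) :
    calc2A g (kn : Int) (j : Int) = cfun g kn j := by
  unfold calc2A cfun
  rw [PySem.List.pyRange_one, show (((kn : Int) - 1) - 0).toNat = kn - 1 from by omega,
      List.foldl_map, PySem.List.foldl_add, sum_map_listRange, zero_add]
  refine Finset.sum_congr rfl (fun t ht => ?_)
  rw [show (0 : Int) + (t : Int) = ((t : ℕ) : Int) from by ring,
      show (j : Int) + (t : Int) = ((j + t : ℕ) : Int) from by push_cast; ring,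
      PySem.List.pyGetD_natCast]
  simp [wN]

theorem sum_map_take_drop (f : Int → Int) (xs : List Int) (j mw : ℕ) (h : j + mw ≤ xs.length) :
    (((xs.drop j).take mw).map f).sum = ∑ t ∈ Finset.range mw, f (xs.getD (j + t) 0) := by
  have hlist : ((xs.drop j).take mw).map f = (List.range mw).map (fun t => f (xs.getD (j + t) 0)) := by
    apply List.ext_getElem
    · simp; omega
    · intro t h1 h2
      simp only [List.getElem_map, List.getElem_take, List.getElem_drop, List.getElem_range]
      rw [List.getD_eq_getElem _ _ (by simp at h1; omega)]
  rw [hlist, sum_map_listRange]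

theorem cfun_second_diff (g : List Int) (kn j : ℕ) :
    cfun g kn (j + 2) - 2 * cfun g kn (j + 1) + cfun g kn j
      = ∑ i ∈ Finset.range (kn - 1),
          wN kn i * (g.getD (j + i + 2) 0 - 2 * g.getD (j + i + 1) 0 + g.getD (j + i) 0) := by
  unfold cfun
  rw [Finset.mul_sum, ← Finset.sum_sub_distrib, ← Finset.sum_add_distrib]
  refine Finset.sum_congr rfl (fun i _ => ?_)
  rw [show j + 2 + i = j + i + 2 from by omega, show j + 1 + i = j + i + 1 from by omega]
  ring

theorem delta2_step (g : List Int) (kn : ℕ) (hk : 2 ≤ kn) (j : ℕ) :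
    (if PySem.Int.mod (kn : Int) 2 = 1 then
       PySem.List.pyGetD g (j : Int) 0
         - PySem.List.pyGetD g ((j : Int) + PySem.Int.floordiv (kn : Int) 2) 0
         - PySem.List.pyGetD g ((j : Int) + PySem.Int.floordiv (kn : Int) 2 + 1) 0
         + PySem.List.pyGetD g ((j : Int) + (kn : Int)) 0
     else
       PySem.List.pyGetD g (j : Int) 0
         - 2 * PySem.List.pyGetD g ((j : Int) + PySem.Int.floordiv (kn : Int) 2) 0
         + PySem.List.pyGetD g ((j : Int) + (kn : Int)) 0)
      = cfun g kn (j + 2) - 2 * cfun g kn (j + 1) + cfun g kn j := by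
  have hdiv : PySem.Int.floordiv (kn : Int) 2 = ((kn / 2 : ℕ) : Int) := by
    exact_mod_cast PySem.Int.floordiv_natCast kn 2
  have hmod : PySem.Int.mod (kn : Int) 2 = ((kn % 2 : ℕ) : Int) := by
    exact_mod_cast PySem.Int.mod_natCast kn 2
  rw [cfun_second_diff, hmod, hdiv]
  obtain ⟨u, hu⟩ : ∃ u, kn = 2 * u + 2 ∨ kn = 2 * u + 3 := ⟨(kn - 2) / 2, by omega⟩
  rcases hu with hu | hu <;> subst hu
  · rw [if_neg (by push_cast; omega)]
    rw [show (2 * u + 2) / 2 = u + 1 from by omega,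
        show (j : Int) + ((u + 1 : ℕ) : Int) = ((j + (u + 1) : ℕ) : Int) from by push_cast; ring,
        show (j : Int) + ((2 * u + 2 : ℕ) : Int) = ((j + (2 * u + 2) : ℕ) : Int) from by push_cast; ring,
        PySem.List.pyGetD_natCast, PySem.List.pyGetD_natCast, PySem.List.pyGetD_natCast,
        show (2 * u + 2) - 1 = 2 * u + 1 from by omega]
    have := delta2_even (fun t => g.getD t 0) u j
    simp only at this
    rw [this, show j + u + 1 = j + (u + 1) from by omega,
        show j + 2 * u + 2 = j + (2 * u + 2) from by omega]
  · rw [if_pos (by push_cast; omega)]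
    rw [show (2 * u + 3) / 2 = u + 1 from by omega,
        show (j : Int) + ((u + 1 : ℕ) : Int) + 1 = ((j + (u + 2) : ℕ) : Int) from by push_cast; ring,
        show (j : Int) + ((u + 1 : ℕ) : Int) = ((j + (u + 1) : ℕ) : Int) from by push_cast; ring,
        show (j : Int) + ((2 * u + 3 : ℕ) : Int) = ((j + (2 * u + 3) : ℕ) : Int) from by push_cast; ring,
        PySem.List.pyGetD_natCast, PySem.List.pyGetD_natCast, PySem.List.pyGetD_natCast,
        PySem.List.pyGetD_natCast,
        show (2 * u + 3) - 1 = 2 * u + 2 from by omega]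
    have := delta2_odd (fun t => g.getD t 0) u j
    simp only at this
    rw [this, show j + u + 1 = j + (u + 1) from by omega,
        show j + u + 2 = j + (u + 2) from by omega,
        show j + 2 * u + 3 = j + (2 * u + 3) from by omega]

theorem loopA_eq (g : List Int) (kn : ℕ) (hk : 2 ≤ kn) (M : ℕ) :
    (PySem.List.pyRange 0 (M : Int) 1).foldl
      (fun (st : Int × Int × Int) j =>
        let delta2 :=
          if PySem.Int.mod (kn : Int) 2 = 1 then
            PySem.List.pyGetD g j 0 - PySem.List.pyGetD g (j + PySem.Int.floordiv (kn : Int) 2) 0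
              - PySem.List.pyGetD g (j + PySem.Int.floordiv (kn : Int) 2 + 1) 0
              + PySem.List.pyGetD g (j + (kn : Int)) 0
          else
            PySem.List.pyGetD g j 0 - 2 * PySem.List.pyGetD g (j + PySem.Int.floordiv (kn : Int) 2) 0
              + PySem.List.pyGetD g (j + (kn : Int)) 0
        let d1 := st.1 + delta2
        let nm1 := st.2.1 + d1
        (d1, nm1, min st.2.2 nm1))
      (cfun g kn 1 - cfun g kn 0, cfun g kn 1, min (cfun g kn 0) (cfun g kn 1))
    = (cfun g kn (M + 1) - cfun g kn M, cfun g kn (M + 1), recMin (cfun g kn) (M + 1)) := by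
  induction M with
  | zero =>
    rw [PySem.List.pyRange_one_eq_nil (by simp)]
    simp [recMin]
  | succ M ih =>
    rw [show ((M + 1 : ℕ) : Int) = (M : Int) + 1 from by push_cast; ring,
        PySem.List.pyRange_one_succ_right (Int.natCast_nonneg M), List.foldl_append, ih]
    simp only [List.foldl_cons, List.foldl_nil]
    rw [delta2_step g kn hk M]
    have h1 : cfun g kn (M + 1) - cfun g kn M
        + (cfun g kn (M + 2) - 2 * cfun g kn (M + 1) + cfun g kn M)
        = cfun g kn (M + 2) - cfun g kn (M + 1) := by ring
    rw [h1]
    have h2 : cfun g kn (M + 1) + (cfun g kn (M + 2) - cfun g kn (M + 1)) = cfun g kn (M + 2) := by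
      ring
    rw [h2]
    rfl

theorem odd_corr (mo : Int) : 2 * PySem.Int.floordiv (mo * (mo + 1)) 2 = mo * (mo + 1) := by
  rcases Int.even_mul_succ_self mo with ⟨c, hc⟩
  rw [hc, PySem.Int.floordiv_eq_ediv_of_pos (by norm_num)]
  omega


theorem foldA_zero (g : List Int) (l : List Int) :
    l.foldl (fun (st : Int × Int × Int) j =>
        let delta2 :=
          if PySem.Int.mod (0 : Int) 2 = 1 then
            PySem.List.pyGetD g j 0 - PySem.List.pyGetD g (j + PySem.Int.floordiv (0 : Int) 2) 0
              - PySem.List.pyGetD g (j + PySem.Int.floordiv (0 : Int) 2 + 1) 0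
              + PySem.List.pyGetD g (j + (0 : Int)) 0
          else
            PySem.List.pyGetD g j 0 - 2 * PySem.List.pyGetD g (j + PySem.Int.floordiv (0 : Int) 2) 0
              + PySem.List.pyGetD g (j + (0 : Int)) 0
        let d1 := st.1 + delta2
        let nm1 := st.2.1 + d1
        (d1, nm1, min st.2.2 nm1)) ((0 : Int), (0 : Int), (0 : Int)) = (0, 0, 0) := by
  induction l with
  | nil => rfl
  | cons x rest ih =>
    rw [List.foldl_cons]
    convert ih using 2
    simp only
    rw [if_neg (by decide), show PySem.Int.floordiv (0 : Int) 2 = 0 from by decide]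
    ring_nf
    norm_num
theorem calc2A_zero_k (g : List Int) (j : Int) : calc2A g 0 j = 0 := by
  unfold calc2A
  rw [PySem.List.pyRange_one_eq_nil (by norm_num)]
  rfl

theorem A_zero (nums : List Int) : p1703_2 nums 0 = 0 := by
  unfold p1703_2
  by_cases hg : (nums.length : Int) = 0 ∨ (0 : Int) = 1
  · rw [if_pos hg]
  · rw [if_neg hg]
    simp only
    rw [if_neg (by intro hc; have := Int.natCast_nonneg (get_gaps nums).length; omega)]
    rw [calc2A_zero_k, calc2A_zero_k, sub_zero, min_self, foldA_zero]
    rw [if_pos (by decide)]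
    decide
theorem B_zero (nums : List Int) : p1703_2_alt nums 0 = 0 := by
  unfold p1703_2_alt
  by_cases hg : (nums.length : Int) = 0 ∨ (0 : Int) = 1
  · rw [if_pos hg]
  · rw [if_neg hg]
    simp only
    have hbody : ∀ j ∈ PySem.List.pyRange 0 (((posLoop nums 0).length : Int) - 0 + 1) 1,
        (PySem.List.slice (posLoop nums 0) (some j) (some (j + 0))).foldl
          (fun acc p => acc + |p - PySem.List.pyGetD (posLoop nums 0) (j + PySem.Int.floordiv 0 2) 0|) 0
        = (0 : Int) := by
      intro j hj
      have hj0 : 0 ≤ j := ((PySem.List.mem_pyRange_one).mp hj).1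
      rw [PySem.List.slice_toNat _ hj0 (by omega), show (j+0).toNat = j.toNat from by omega,
          Nat.sub_self, List.take_zero]
      rfl
    rw [List.map_congr_left hbody]
    have hlen : (PySem.List.pyRange 0 (((posLoop nums 0).length : Int) - 0 + 1) 1).length
        = (posLoop nums 0).length + 1 := by
      rw [PySem.List.length_pyRange_one]; omega
    rw [List.map_const', hlen, List.replicate_succ, PySem.List.min?_id_cons,
        foldl_min_replicate]
    rw [if_pos (by decide)]
    decide
theorem corr_eq (k : Int) :
    (if PySem.Int.mod k 2 = 0 then
       triangular (PySem.Int.floordiv k 2 - 1) + triangular (PySem.Int.floordiv k 2)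
     else 2 * triangular (PySem.Int.floordiv k 2))
    = (if PySem.Int.mod k 2 = 0 then
         PySem.Int.floordiv ((PySem.Int.floordiv k 2 - 1) * PySem.Int.floordiv k 2) 2
           + PySem.Int.floordiv (PySem.Int.floordiv k 2 * (PySem.Int.floordiv k 2 + 1)) 2
       else PySem.Int.floordiv k 2 * (PySem.Int.floordiv k 2 + 1)) := by
  set m := PySem.Int.floordiv k 2
  by_cases hp : PySem.Int.mod k 2 = 0
  · rw [if_pos hp, if_pos hp]
    unfold triangular
    rw [show (m - 1) * (m - 1 + 1) = (m - 1) * m from by ring]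
  · rw [if_neg hp, if_neg hp]
    exact odd_corr m

theorem cost_eq (nums : List Int) (kn j : ℕ) (hkn2 : 2 ≤ kn)
    (hjw : j + kn ≤ (posLoop nums 0).length) :
    (PySem.List.slice (posLoop nums 0) (some (j : Int)) (some ((j : Int) + (kn : Int)))).foldl
        (fun acc p => acc + |p - PySem.List.pyGetD (posLoop nums 0)
          ((j : Int) + PySem.Int.floordiv (kn : Int) 2) 0|) 0
      = cfun (diffs (posLoop nums 0)) kn j := by
  set P := posLoop nums 0 with hPdef
  have hdiv : PySem.Int.floordiv (kn : Int) 2 = ((kn / 2 : ℕ) : Int) := by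
    exact_mod_cast PySem.Int.floordiv_natCast kn 2
  rw [hdiv, show (j : Int) + ((kn / 2 : ℕ) : Int) = ((j + kn / 2 : ℕ) : Int) from by push_cast; ring,
      PySem.List.pyGetD_natCast, PySem.List.slice_natCast_add, PySem.List.foldl_add, zero_add,
      sum_map_take_drop _ P j kn hjw]
  have hw := window_abs_eq (fun t => P.getD t 0) kn j hkn2
    (fun a b ha hab hb => P_mono P (posLoop_pairwise nums 0) a b hab (by omega))
  simp only at hw
  rw [hw]
  unfold cfun
  refine Finset.sum_congr rfl (fun i hi => ?_)
  have hi' : i < kn - 1 := Finset.mem_range.mp hi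
  rw [diffs_getD P (j + i) (by omega)]

theorem B_main (nums : List Int) (kn : ℕ) (hkn2 : 2 ≤ kn)
    (hcount : kn ≤ (posLoop nums 0).length) :
    (PySem.List.min?
        ((PySem.List.pyRange 0 (((posLoop nums 0).length : Int) - (kn : Int) + 1) 1).map
          (fun j => (PySem.List.slice (posLoop nums 0) (some j) (some (j + (kn : Int)))).foldl
            (fun acc p => acc + |p - PySem.List.pyGetD (posLoop nums 0)
              (j + PySem.Int.floordiv (kn : Int) 2) 0|) 0))
        (fun y => y)).getD 0
      = recMin (cfun (diffs (posLoop nums 0)) kn) ((posLoop nums 0).length - kn) := by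
  set P := posLoop nums 0 with hPdef
  set W := P.length - kn with hW
  rw [show ((P.length : Int) - (kn : Int) + 1) = ((W + 1 : ℕ) : Int) from by omega,
      PySem.List.pyRange_one, show ((((W + 1 : ℕ)) : Int) - 0).toNat = W + 1 from by omega,
      List.map_map]
  simp only [zero_add]
  rw [min?_map_range, Option.getD_some]
  exact recMin_congr _ _ W (fun t ht => cost_eq nums kn t hkn2 (by rw [← hPdef]; omega))

-- ===== VERDICT (by name: the statement is the Claim_ definition above) =====
theorem p1703_2_spec : Claim_equal_p1703_2 := by
  intro nums k hdom hpre
  unfold Spec_p1703_2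
  by_cases hguard : (nums.length : Int) = k ∨ k = 1
  · unfold p1703_2 p1703_2_alt
    rw [if_pos hguard, if_pos hguard]
  · have hk : k = 0 ∨ (2 ≤ k ∧ k ≤ (nums.count 1 : Int)) := by
      rcases hpre with h | h | h | h
      · exact absurd (Or.inl h) hguard
      · exact absurd (Or.inr h) hguard
      · exact Or.inl h
      · exact Or.inr h
    rcases hk with hk0 | ⟨hk2, hcnt⟩
    · subst hk0
      rw [A_zero, B_zero]
    · obtain ⟨kn, hkn⟩ : ∃ kn : ℕ, k = (kn : Int) := ⟨k.toNat, by omega⟩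
      subst hkn
      have hkn2 : 2 ≤ kn := by exact_mod_cast hk2
      have hcount : kn ≤ (posLoop nums 0).length := by
        rw [posLoop_count]; exact_mod_cast hcnt
      unfold p1703_2 p1703_2_alt
      rw [if_neg hguard, if_neg hguard]
      simp only
      rw [get_gaps_eq nums]
      simp only [corr_eq]
      rw [B_main nums kn hkn2 hcount]
      by_cases hb : ((diffs (posLoop nums 0)).length : Int) = (kn : Int) - 1
      · rw [if_pos hb]
        have hdl := diffs_length (posLoop nums 0)
        have hn : (posLoop nums 0).length = kn := by omega
        have e0 : calc2A (diffs (posLoop nums 0)) (kn : Int) 0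
            = cfun (diffs (posLoop nums 0)) kn 0 := by
          simpa using calc2A_eq (diffs (posLoop nums 0)) kn 0
        rw [e0, hn, Nat.sub_self]
        rfl
      · rw [if_neg hb]
        have hdl := diffs_length (posLoop nums 0)
        have hlt : kn < (posLoop nums 0).length := by omega
        have e0 : calc2A (diffs (posLoop nums 0)) (kn : Int) 0
            = cfun (diffs (posLoop nums 0)) kn 0 := by
          simpa using calc2A_eq (diffs (posLoop nums 0)) kn 0
        have e1 : calc2A (diffs (posLoop nums 0)) (kn : Int) 1
            = cfun (diffs (posLoop nums 0)) kn 1 := by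
          simpa using calc2A_eq (diffs (posLoop nums 0)) kn 1
        rw [e0, e1,
            show ((diffs (posLoop nums 0)).length : Int) - (kn : Int)
              = (((posLoop nums 0).length - 1 - kn : ℕ) : Int) from by omega,
            loopA_eq (diffs (posLoop nums 0)) kn hkn2 ((posLoop nums 0).length - 1 - kn)]
        simp only
        rw [show (posLoop nums 0).length - 1 - kn + 1 = (posLoop nums 0).length - kn from by omega]
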